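-- pv_equiv track=rewrite | github.com/csandoval18/DSA | CodeNinjas/Two Pointers/move_zeroes.py | sortedBinaryArr
-- ===== SOURCE A (Python) =====
-- def sortedBinaryArr(arr, n):
--   l, r = 0, 0
--
--   while l<n:
--     if arr[l] != 1:
--       arr[l], arr[r] = arr[r], arr[l]
--       r += 1
--     l += 1
--   return arr
-- ===== SOURCE B (Python) =====
-- def sortedBinaryArr(arr, n):
--   if n > 0:
--     pre = [x for x in arr[:n] if x != 1]
--     arr[:n] = pre + [1] * (n - len(pre))
--   return arr
-- ===== Notes on version B (the rewrite author's own statement) =====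
-- stated objective: simpler
-- what changed: Replaces the in-place two-pointer swap loop with a single filter pass: collect the non-1 values of the first n elements, then rewrite the prefix as that filtered list padded with 1s via slice assignment (C-level comprehension instead of per-element Python-level swaps).
import Mathlib
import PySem

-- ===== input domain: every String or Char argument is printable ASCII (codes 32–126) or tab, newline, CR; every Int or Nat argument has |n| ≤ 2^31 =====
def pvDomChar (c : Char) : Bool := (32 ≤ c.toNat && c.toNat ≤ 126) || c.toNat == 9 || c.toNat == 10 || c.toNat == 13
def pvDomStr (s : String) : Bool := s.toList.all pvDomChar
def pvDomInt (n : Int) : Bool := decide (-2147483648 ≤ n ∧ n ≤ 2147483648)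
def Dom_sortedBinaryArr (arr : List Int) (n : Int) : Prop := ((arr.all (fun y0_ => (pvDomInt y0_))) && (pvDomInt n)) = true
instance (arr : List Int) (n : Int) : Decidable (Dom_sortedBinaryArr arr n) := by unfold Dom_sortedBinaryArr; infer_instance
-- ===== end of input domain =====

-- B replaces A's in-place two-pointer swap loop by a filter-and-pad rewrite of the prefix
-- (objective: simpler); both mutate arr to the same contents on Pre_, equivalence is about the return value.

-- ===== PORT A =====
-- while l < n: if arr[l] != 1 then swap arr[l], arr[r]; r += 1; l += 1.
-- 'none' models the IndexError when arr[l] (or arr[r]) is out of range; l, r start at 0 and only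
-- grow, so the List.set indices are the exact Python assignments arr[l] = …, arr[r] = ….
def sortedBinaryArrGo (arr : List Int) (n l r : Int) : Option (List Int) :=
  if _h : l < n then
    match PySem.List.pyGet? arr l with
    | none => none
    | some v =>
      if v ≠ 1 then
        match PySem.List.pyGet? arr r with
        | none => none
        | some w =>
          sortedBinaryArrGo ((arr.set l.toNat w).set r.toNat v) n (l + 1) (r + 1)
      else sortedBinaryArrGo arr n (l + 1) r
  else some arr
termination_by (n - l).toNat
decreasing_by all_goals omega

def sortedBinaryArr (arr : List Int) (n : Int) : List Int :=
  (sortedBinaryArrGo arr n 0 0).getD arr   -- none is unreachable under Pre_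

-- ===== PORT B =====
def sortedBinaryArr_alt (arr : List Int) (n : Int) : List Int :=
  if n > 0 then
    let pre := (PySem.List.slice arr none (some n)).filter (fun x => x ≠ 1)
    pre ++ List.replicate (n - (pre.length : Int)).toNat 1 ++ PySem.List.slice arr (some n) none
  else arr

-- ===== PRECONDITION & SPEC =====
-- A raises IndexError exactly when n > len(arr) (the loop then reaches arr[len]); Pre_ is all inputs A returns on.
def Pre_sortedBinaryArr (arr : List Int) (n : Int) : Prop := n ≤ (arr.length : Int)
instance (arr : List Int) (n : Int) : Decidable (Pre_sortedBinaryArr arr n) := by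
  unfold Pre_sortedBinaryArr; infer_instance

def pvWitness_sortedBinaryArr : List Int × Int := ([0, 1, 2, 1, 0], 4)

def Spec_sortedBinaryArr (arr : List Int) (n : Int) (out : List Int) : Prop := out = sortedBinaryArr_alt arr n
instance (arr : List Int) (n : Int) (out : List Int) : Decidable (Spec_sortedBinaryArr arr n out) := by unfold Spec_sortedBinaryArr; infer_instance

-- ===== CLAIM (what is proved, stated in full; the proofs are below) =====
def Claim_equal_sortedBinaryArr : Prop := ∀ (arr : List Int) (n : Int), Dom_sortedBinaryArr arr n → Pre_sortedBinaryArr arr n → Spec_sortedBinaryArr arr n (sortedBinaryArr arr n)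

-- ===== LEMMAS AND PROOFS =====

-- Loop invariant: processing m more elements from state F ++ 1^k ++ rest with l = |F| + k, r = |F|.
theorem sortedBinaryArrGo_inv (m : Nat) :
    ∀ (rest F : List Int) (k : Nat), m ≤ rest.length →
    sortedBinaryArrGo (F ++ List.replicate k 1 ++ rest)
        ((F.length : Int) + k + m) ((F.length : Int) + k) (F.length : Int)
      = some (F ++ (rest.take m).filter (fun x => x ≠ 1)
              ++ List.replicate (k + (m - ((rest.take m).filter (fun x => x ≠ 1)).length)) 1
              ++ rest.drop m) := by
  induction m with
  | zero =>
    intro rest F k _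
    rw [sortedBinaryArrGo]
    simp
  | succ m ih =>
    intro rest F k hm
    match rest with
    | [] => simp at hm
    | x :: rest' =>
      have hm' : m ≤ rest'.length := by simpa using hm
      rw [sortedBinaryArrGo]
      have hl : ((F.length : Int) + k) < (F.length : Int) + k + (m + 1 : Nat) := by
        push_cast; omega
      have hgetl : PySem.List.pyGet? (F ++ List.replicate k 1 ++ x :: rest')
          ((F.length : Int) + k) = some x := by
        have he : (F ++ List.replicate k 1 ++ x :: rest')
             = (F ++ List.replicate k 1) ++ x :: rest' := by simp
        rw [he]
        have hlen : ((F ++ List.replicate k 1).length : Int) = (F.length : Int) + k := by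
          simp
        rw [← hlen, PySem.List.pyGet?_append_length]
      rw [dif_pos hl, hgetl]
      dsimp only
      by_cases hx : x = 1
      · -- no swap: the 1 joins the ones block
        subst hx
        rw [if_neg (by simp)]
        have h1 : F ++ List.replicate k 1 ++ (1 : Int) :: rest'
            = F ++ List.replicate (k + 1) 1 ++ rest' := by
          simp [List.replicate_succ' (n := k)]
        have h2 : (F.length : Int) + k + (m + 1 : Nat) = (F.length : Int) + (k + 1 : Nat) + (m : Nat) := by
          push_cast; ring_nf
        have h3 : (F.length : Int) + k + 1 = (F.length : Int) + (k + 1 : Nat) := by push_cast; ring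
        rw [h1, h2, h3, ih rest' F (k + 1) hm']
        simp only [List.take_succ_cons, List.drop_succ_cons, List.filter_cons]
        norm_num
        all_goals
          have hle2 : (List.filter (fun x : Int => !decide (x = 1)) (List.take m rest')).length ≤ m :=
            le_trans (List.length_filter_le _ _) (List.length_take_le _ _)
        all_goals omega
      · -- swap with arr[r]
        rw [if_pos (by simpa using hx)]
        have hgetr : PySem.List.pyGet? (F ++ List.replicate k 1 ++ x :: rest')
            ((F.length : Int)) = some (if k = 0 then x else 1) := by
          cases k with
          | zero =>
            have he : F ++ List.replicate 0 (1 : Int) ++ x :: rest' = F ++ x :: rest' := by simp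
            rw [he, PySem.List.pyGet?_append_length, if_pos rfl]
          | succ k' =>
            rw [if_neg (by omega)]
            have he : F ++ List.replicate (k' + 1) 1 ++ x :: rest'
                 = F ++ (1 : Int) :: (List.replicate k' 1 ++ x :: rest') := by
              simp [List.replicate_succ]
            rw [he, PySem.List.pyGet?_append_length]
        rw [hgetr]
        dsimp only
        have hset :
            ((F ++ List.replicate k 1 ++ x :: rest').set ((F.length : Int) + k).toNat
                (if k = 0 then x else 1)).set ((F.length : Int)).toNat x
            = (F ++ [x]) ++ List.replicate k 1 ++ rest' := by
          have h0' : ((F.length : Int)).toNat = F.length := by omega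
          cases k with
          | zero =>
            rw [if_pos rfl]
            have h0 : ((F.length : Int) + ((0 : Nat) : Int)).toNat = F.length := by omega
            have he : F ++ List.replicate 0 (1 : Int) ++ x :: rest' = F ++ x :: rest' := by simp
            have hone : ∀ v : Int, (F ++ x :: rest').set F.length v = F ++ v :: rest' := by
              intro v
              rw [List.set_append_right _ _ (le_refl _)]
              simp
            rw [h0, h0', he, hone, hone]
            simp
          | succ k' =>
            rw [if_neg (by omega)]
            have h0 : ((F.length : Int) + ((k' + 1 : Nat) : Int)).toNat = F.length + (k' + 1) := by
              omega
            rw [h0, h0']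
            have he : F ++ List.replicate (k' + 1) 1 ++ x :: rest'
                 = F ++ (List.replicate (k' + 1) 1 ++ x :: rest') := by simp
            rw [he, List.set_append_right _ _ (by omega : F.length ≤ F.length + (k' + 1))]
            have hi1 : F.length + (k' + 1) - F.length = k' + 1 := by omega
            rw [hi1]
            have hinner : (List.replicate (k' + 1) (1 : Int) ++ x :: rest').set (k' + 1) 1
                 = List.replicate (k' + 1) 1 ++ 1 :: rest' := by
              simp
            rw [hinner, List.set_append_right _ _ (le_refl _)]
            have hi3 : F.length - F.length = 0 := by omega
            rw [hi3]
            have houter : (List.replicate (k' + 1) (1 : Int) ++ (1 : Int) :: rest').set 0 x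
                 = x :: (List.replicate k' 1 ++ 1 :: rest') := by
              simp [List.replicate_succ]
            rw [houter]
            have hrep2 : List.replicate (k' + 1) (1 : Int) ++ rest'
                 = List.replicate k' 1 ++ 1 :: rest' := by
              simp [List.replicate_succ' (n := k')]
            simp [hrep2]
        rw [hset]
        have h2 : (F.length : Int) + k + (m + 1 : Nat)
            = (((F ++ [x]).length : Int)) + k + (m : Nat) := by simp; ring
        have h3 : (F.length : Int) + k + 1 = ((F ++ [x]).length : Int) + k := by
          simp; ring
        have h4 : (F.length : Int) + 1 = ((F ++ [x]).length : Int) := by simp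
        rw [h2, h3, h4, ih rest' (F ++ [x]) k hm']
        simp only [List.take_succ_cons, List.drop_succ_cons, List.filter_cons, List.append_assoc,
          List.cons_append, List.nil_append]
        norm_num [hx]
        all_goals omega

theorem sortedBinaryArr_eq_alt (arr : List Int) (n : Int)
    (h : Pre_sortedBinaryArr arr n) : sortedBinaryArr arr n = sortedBinaryArr_alt arr n := by
  unfold Pre_sortedBinaryArr at h
  unfold sortedBinaryArr sortedBinaryArr_alt
  by_cases hn : n > 0
  · rw [if_pos hn]
    have hm : n = ((n.toNat : Nat) : Int) := by omega
    have hmle : n.toNat ≤ arr.length := by omega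
    have := sortedBinaryArrGo_inv n.toNat arr [] 0 hmle
    simp only [List.length_nil, Nat.cast_zero, List.replicate_zero, List.nil_append,
      List.append_nil, zero_add] at this
    rw [hm, this]
    rw [PySem.List.slice_to_natCast, PySem.List.slice_from_natCast]
    simp only [Option.getD_some]
    congr 2
    have hfl : ((arr.take n.toNat).filter (fun x => x ≠ 1)).length ≤ n.toNat := by
      calc ((arr.take n.toNat).filter (fun x => x ≠ 1)).length
          ≤ (arr.take n.toNat).length := List.length_filter_le _ _
        _ ≤ n.toNat := by simp
    congr 1
    omega
  · rw [if_neg hn]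
    rw [sortedBinaryArrGo]
    rw [dif_neg (by omega)]
    rfl

-- ===== VERDICT (by name: the statement is the Claim_ definition above) =====
theorem sortedBinaryArr_spec : Claim_equal_sortedBinaryArr := by
  intro arr n _ hpre
  unfold Spec_sortedBinaryArr
  exact sortedBinaryArr_eq_alt arr n hpre
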